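-- pv_equiv track=rewrite | github.com/he23inw3/python-study | ABC081_C/main.py | not_so_diverse
-- ===== SOURCE A (Python) =====
-- from typing import List
-- from collections import Counter, deque
--
-- def not_so_diverse(n: int, k: int, a_list: List[int]) -> int:
--     a_list = Counter(a_list)
--     a_list = [tuple(i) for i in a_list.items()]
--     a_list.sort(key=lambda x: x[1])
--     a_list = deque(a_list)
--     result = 0
--     while k < len(a_list):
--         result += a_list.popleft()[1]
--     return result
-- ===== SOURCE B (Python) =====
-- from collections import Counter
--
--
-- def not_so_diverse(n, k, a_list):
--     # Bucket (counting-sort) selection: tally how many distinct values have each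
--     # frequency, then sweep frequencies 1..len(a_list) upward, removing the
--     # smallest frequencies until at most k distinct values remain.
--     counts = Counter(a_list)
--     buckets = Counter(counts.values())
--     need = len(counts) - k  # number of distinct values to eliminate
--     result = 0
--     for c in range(1, len(a_list) + 1):
--         if need <= 0:
--             break
--         t = buckets[c]
--         take = t if t < need else need
--         result += take * c
--         need -= take
--     return result
-- ===== Notes on version B (the rewrite author's own statement) =====
-- stated objective: faster
-- what changed: A sorts the frequency table and pops the smallest entries off a deque; B never sorts: it tallies how many distinct values have each frequency (a Counter of counts) and sweeps frequency buckets upward, stopping as soon as at most k distinct values remain — a counting-sort style selection.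
import Mathlib
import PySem

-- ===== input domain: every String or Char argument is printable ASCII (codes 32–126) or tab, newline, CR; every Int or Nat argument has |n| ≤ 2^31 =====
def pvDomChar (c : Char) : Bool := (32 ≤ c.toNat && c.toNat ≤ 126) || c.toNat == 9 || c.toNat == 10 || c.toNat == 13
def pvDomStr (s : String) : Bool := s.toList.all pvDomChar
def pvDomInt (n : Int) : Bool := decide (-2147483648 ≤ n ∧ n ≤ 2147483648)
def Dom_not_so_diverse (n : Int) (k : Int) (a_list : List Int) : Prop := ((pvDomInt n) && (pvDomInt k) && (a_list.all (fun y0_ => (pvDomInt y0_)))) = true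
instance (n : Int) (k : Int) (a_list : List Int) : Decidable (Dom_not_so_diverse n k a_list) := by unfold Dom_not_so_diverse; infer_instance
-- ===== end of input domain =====

-- B replaces A's comparison sort of the frequency table by a counting-sort style
-- bucket sweep over frequency values (alternative algorithm, O(n + m) selection).

-- ===== PORT A =====
-- the 'while k < len(a_list): result += a_list.popleft()[1]' loop;
-- the [] case with k < 0 is Python's IndexError (popleft from empty deque), excluded by Pre_
def pvAloop (k : Int) : List (Int × Int) → Int → Int
  | [], res => res
  | x :: t, res =>
      if k < ((x :: t).length : Int) then pvAloop k t (res + x.2) else res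

def not_so_diverse (n : Int) (k : Int) (a_list : List Int) : Int :=
  let cnt := PySem.Dict.counter a_list
  let pairs := PySem.List.sorted cnt.items (fun x => x.2) false
  pvAloop k pairs 0

-- ===== PORT B =====
-- loop body of B's 'for c in range(1, len(a_list)+1)'; the Python 'break' on
-- need <= 0 is ported as a skip (the state is then unchanged for every later c)
def pvBstep (buckets : PySem.Dict Int Int) (s : Int × Int) (c : Int) : Int × Int :=
  if s.2 ≤ 0 then s
  else
    let t := buckets.getD c 0
    let take := if t < s.2 then t else s.2
    (s.1 + take * c, s.2 - take)

def not_so_diverse_alt (n : Int) (k : Int) (a_list : List Int) : Int :=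
  let counts := PySem.Dict.counter a_list
  let buckets := PySem.Dict.counter counts.values
  ((PySem.List.pyRange 1 ((a_list.length : Int) + 1) 1).foldl (pvBstep buckets)
      (0, (counts.size : Int) - k)).1

-- ===== PRECONDITION & SPEC =====
-- A raises IndexError (popleft from an empty deque) exactly when k < 0; Pre_ excludes those inputs.
def Pre_not_so_diverse (n : Int) (k : Int) (a_list : List Int) : Prop := 0 ≤ k
instance (n : Int) (k : Int) (a_list : List Int) : Decidable (Pre_not_so_diverse n k a_list) := by unfold Pre_not_so_diverse; infer_instance
def pvWitness_not_so_diverse : Int × Int × List Int := (3, 1, [1, 1, 2])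

def Spec_not_so_diverse (n : Int) (k : Int) (a_list : List Int) (out : Int) : Prop := out = not_so_diverse_alt n k a_list
instance (n : Int) (k : Int) (a_list : List Int) (out : Int) : Decidable (Spec_not_so_diverse n k a_list out) := by unfold Spec_not_so_diverse; infer_instance

-- ===== CLAIM (what is proved, stated in full; the proofs are below) =====
def Claim_equal_not_so_diverse : Prop := ∀ (n : Int) (k : Int) (a_list : List Int), Dom_not_so_diverse n k a_list → Pre_not_so_diverse n k a_list → Spec_not_so_diverse n k a_list (not_so_diverse n k a_list)

-- ===== LEMMAS AND PROOFS =====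

-- A's loop pops (and sums the counts of) exactly the first (len - k) pairs
lemma pvAloop_eq (k : Int) (hk : 0 ≤ k) :
    ∀ (ys : List (Int × Int)) (res : Int),
      pvAloop k ys res = res + ((ys.take (ys.length - k.toNat)).map (·.2)).sum := by
  intro ys
  induction ys with
  | nil => intro res; simp [pvAloop]
  | cons x t ih =>
    intro res
    rw [pvAloop]
    by_cases h : k < ((x :: t).length : Int)
    · rw [if_pos h, ih]
      have hlen : (x :: t).length - k.toNat = (t.length - k.toNat) + 1 := by
        simp only [List.length_cons] at h ⊢; omega
      rw [hlen, List.take_succ_cons]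
      simp [List.sum_cons]; ring
    · rw [if_neg h]
      have hlen : (x :: t).length - k.toNat = 0 := by
        simp only [List.length_cons] at h ⊢; omega
      rw [hlen, List.take_zero]
      simp

-- proof-side form of B's loop body, with the bucket lookup replaced by the count in ys
def pvCStep (ys : List Int) (s : Int × Int) (c : Int) : Int × Int :=
  if s.2 ≤ 0 then s
  else
    let t : Int := (ys.count c : Int)
    let tk := if t < s.2 then t else s.2
    (s.1 + tk * c, s.2 - tk)

lemma pvCStep_skip (ys : List Int) :
    ∀ (cs : List Int) (s : Int × Int), s.2 ≤ 0 → cs.foldl (pvCStep ys) s = s := by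
  intro cs
  induction cs with
  | nil => intro s _; rfl
  | cons c cs' ih =>
    intro s h
    rw [List.foldl_cons, pvCStep, if_pos h, ih s h]

-- in a ≤-sorted list whose elements are all ≥ c, the copies of c form a prefix
lemma pvSplit (c : Int) :
    ∀ (ys : List Int), ys.Pairwise (· ≤ ·) → (∀ y ∈ ys, c ≤ y) →
      ys = List.replicate (ys.count c) c ++ ys.drop (ys.count c) ∧
        ∀ y ∈ ys.drop (ys.count c), c < y := by
  intro ys
  induction ys with
  | nil => intro _ _; simp
  | cons y t ih =>
    intro hs hge
    rcases List.pairwise_cons.mp hs with ⟨hhead, htail⟩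
    by_cases hy : y = c
    · subst hy
      have hge' : ∀ z ∈ t, y ≤ z := fun z hz => hge z (List.mem_cons_of_mem _ hz)
      rcases ih htail hge' with ⟨h1, h2⟩
      constructor
      · rw [List.count_cons_self, List.replicate_succ, List.cons_append,
          List.drop_succ_cons]
        exact congrArg (y :: ·) h1
      · rw [List.count_cons_self, List.drop_succ_cons]
        exact h2
    · have hcy : c < y := lt_of_le_of_ne (hge y (List.mem_cons_self)) (fun h => hy h.symm)
      have hz : ∀ z ∈ y :: t, c < z := by
        intro z hz
        rcases List.mem_cons.mp hz with h | h
        · exact h ▸ hcy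
        · exact lt_of_lt_of_le hcy (hhead z h)
      have hcnt : (y :: t).count c = 0 :=
        List.count_eq_zero.mpr (fun hmem => absurd rfl (ne_of_gt (hz c hmem)))
      constructor
      · rw [hcnt]; simp
      · rw [hcnt, List.drop_zero]; exact hz

-- the bucket sweep over a strictly increasing candidate list computes the sum of
-- the smallest 'need' elements of a sorted list drawn from those candidates
lemma pvMain :
    ∀ (cs ys : List Int) (res need : Int), ys.Pairwise (· ≤ ·) →
      cs.Pairwise (· < ·) → (∀ y ∈ ys, y ∈ cs) →
      (cs.foldl (pvCStep ys) (res, need)).1 = res + (ys.take need.toNat).sum := by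
  intro cs
  induction cs with
  | nil =>
    intro ys res need _ _ hmem
    have : ys = [] := by
      cases ys with
      | nil => rfl
      | cons a t => exact absurd (hmem a List.mem_cons_self) (List.not_mem_nil)
    simp [this]
  | cons c cs' ih =>
    intro ys res need hys hcs hmem
    rcases List.pairwise_cons.mp hcs with ⟨hclt, hcs'⟩
    by_cases hn : need ≤ 0
    · rw [List.foldl_cons, pvCStep, if_pos hn, pvCStep_skip ys cs' _ hn]
      have : need.toNat = 0 := by omega
      simp [this]
    · have hge : ∀ y ∈ ys, c ≤ y := by
        intro y hy
        rcases List.mem_cons.mp (hmem y hy) with h | h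
        · exact le_of_eq h.symm
        · exact le_of_lt (hclt y h)
      rcases pvSplit c ys hys hge with ⟨hdec, hgt⟩
      set t : Nat := ys.count c with ht
      set ys' : List Int := ys.drop t with hys'
      have hys'sorted : ys'.Pairwise (· ≤ ·) :=
        List.Pairwise.sublist (List.drop_sublist t ys) hys
      have hmem' : ∀ y ∈ ys', y ∈ cs' := by
        intro y hy
        rcases List.mem_cons.mp (hmem y (List.mem_of_mem_drop hy)) with h | h
        · exact absurd h.symm (ne_of_lt (hgt y hy))
        · exact h
      have hcount' : ∀ c' ∈ cs', ys.count c' = ys'.count c' := by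
        intro c' hc'
        conv_lhs => rw [hdec]
        rw [List.count_append, List.count_replicate]
        have hne : (c == c') = false := beq_eq_false_iff_ne.mpr (hclt c' hc').ne
        rw [hne]
        simp
      have hstep : ∀ (acc : Int × Int), ∀ c' ∈ cs',
          pvCStep ys acc c' = pvCStep ys' acc c' := by
        intro acc c' hc'
        simp only [pvCStep, hcount' c' hc']
      rw [List.foldl_cons, pvCStep, if_neg hn]
      simp only
      set tk : Int := if (t : Int) < need then (t : Int) else need with htk
      rw [PySem.List.foldl_congr_mem cs' _ _ _ hstep,
        ih ys' (res + tk * c) (need - tk) hys'sorted hcs' hmem']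
      by_cases hlt : (t : Int) < need
      · have htk' : tk = (t : Int) := if_pos hlt
        have htake : ys.take need.toNat = List.replicate t c ++ ys'.take (need.toNat - t) := by
          conv_lhs => rw [hdec]
          rw [List.take_append, List.take_replicate, List.length_replicate]
          have h2 : min need.toNat t = t := by omega
          rw [h2]
        rw [htake, List.sum_append, List.sum_replicate]
        have : (need - tk).toNat = need.toNat - t := by omega
        rw [this, htk']
        push_cast [nsmul_eq_mul]
        ring
      · have htk' : tk = need := if_neg hlt
        have htake : ys.take need.toNat = List.replicate need.toNat c := by
          conv_lhs => rw [hdec]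
          rw [List.take_append, List.take_replicate, List.length_replicate]
          have h1 : need.toNat - t = 0 := by omega
          have h2 : min need.toNat t = need.toNat := by omega
          rw [h1, h2, List.take_zero, List.append_nil]
        have h2 : (need - tk).toNat = 0 := by omega
        rw [htake, h2, List.take_zero, List.sum_nil, add_zero, List.sum_replicate,
          nsmul_eq_mul, htk']
        have h3 : ((need.toNat : Int)) = need := by omega
        rw [h3]


lemma pvRange_pairwise (a b : Int) : (PySem.List.pyRange a b 1).Pairwise (· < ·) := by
  unfold PySem.List.pyRange
  simp only [if_neg (one_ne_zero)]
  rw [List.pairwise_map]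
  exact (List.pairwise_lt_range).imp (by intro k k' h; omega)

-- ===== VERDICT (by name: the statement is the Claim_ definition above) =====
theorem not_so_diverse_spec : Claim_equal_not_so_diverse := by
  intro n k L _ hpre
  unfold Spec_not_so_diverse not_so_diverse not_so_diverse_alt
  simp only
  have hk : 0 ≤ k := hpre
  set items := (PySem.Dict.counter L).items with hitems
  set S := PySem.List.sorted items (fun x => x.2) false with hS
  set zs := S.map (·.2) with hzs
  -- A's value
  rw [pvAloop_eq k hk S 0, zero_add, List.map_take]
  -- relate zs to the counter's values
  have hvals : (PySem.Dict.counter L).values = items.map (·.2) := by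
    rw [hitems]
    simp [PySem.Dict.values]
  have hperm : zs.Perm ((PySem.Dict.counter L).values) := by
    rw [hvals]
    exact (PySem.List.sorted_perm items (fun x => x.2) false).map (·.2)
  -- B's fold equals the proof-side fold over counts in zs
  have hstep : ∀ (acc : Int × Int), ∀ c ∈ PySem.List.pyRange 1 ((L.length : Int) + 1) 1,
      pvBstep (PySem.Dict.counter ((PySem.Dict.counter L).values)) acc c = pvCStep zs acc c := by
    intro acc c _
    simp only [pvBstep, pvCStep, PySem.Dict.getD_counter]
    rw [hperm.count_eq c]
  rw [PySem.List.foldl_congr_mem _ _ _ _ hstep]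
  -- hypotheses of pvMain
  have hzsPair : zs.Pairwise (· ≤ ·) := PySem.List.sorted_map_key_pairwise items (fun x => x.2)
  have hmem : ∀ y ∈ zs, y ∈ PySem.List.pyRange 1 ((L.length : Int) + 1) 1 := by
    intro y hy
    have hyv : y ∈ (PySem.Dict.counter L).values := hperm.mem_iff.mp hy
    rw [hvals, hitems, PySem.Dict.items_counter] at hyv
    rw [List.map_map] at hyv
    rcases List.mem_map.mp hyv with ⟨v, hv, hveq⟩
    have hvL : v ∈ L := (PySem.Set.mem_ofList L v).mp hv
    have h1 : 0 < L.count v := List.count_pos_iff.mpr hvL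
    have h2 : L.count v ≤ L.length := List.count_le_length
    rw [PySem.List.mem_pyRange_one]
    simp only [Function.comp] at hveq
    omega
  rw [pvMain _ zs 0 ((((PySem.Dict.counter L).size : Int)) - k) hzsPair
    (pvRange_pairwise _ _) hmem, zero_add]
  -- the two take-lengths agree
  have hlen : zs.length = (PySem.Dict.counter L).size := by
    rw [hzs, List.length_map, hS, PySem.List.length_sorted, hitems]
    rfl
  have : ((((PySem.Dict.counter L).size : Int)) - k).toNat = S.length - k.toNat := by
    have hSlen : S.length = zs.length := by rw [hzs, List.length_map]
    omega
  rw [this]
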